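-- pv_equiv track=rewrite | github.com/Protonk/BIDDER | experiments/acm-champernowne/substrate-phase/phase_diagram.py | per_digit_counts
-- ===== SOURCE A (Python) =====
-- def per_digit_counts(b, n, d):
--     """Count n-prime atoms in each leading-digit strip of B_{b, d}."""
--     counts = []
--     n_sq = n * n
--     base = b**(d - 1)
--     for k in range(1, b):
--         lo = k * base
--         hi = (k + 1) * base - 1
--         c_n = hi // n - (lo - 1) // n
--         c_nsq = hi // n_sq - (lo - 1) // n_sq
--         counts.append(c_n - c_nsq)
--     return counts
-- ===== SOURCE B (Python) =====
-- def per_digit_counts(b, n, d):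
--     """Count n-prime atoms in each leading-digit strip of B_{b, d}.
--
--     Running-remainder algorithm: the number of multiples of m in a
--     half-open block (x, x + base] is (x % m + base) // m, so a single
--     pass propagates the remainders of the strip boundary modulo n and
--     n*n, taking one divmod per modulus per strip.
--     """
--     if b < 2:
--         return []
--     base = b ** (d - 1)
--     m1, m2 = n, n * n
--     r1 = (base - 1) % m1
--     r2 = (base - 1) % m2
--     counts = []
--     for _ in range(1, b):
--         q1, r1 = divmod(r1 + base, m1)
--         q2, r2 = divmod(r2 + base, m2)
--         counts.append(q1 - q2)
--     return counts
-- ===== Notes on version B (the rewrite author's own statement) =====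
-- stated objective: alternative
-- what changed: Replaces A's per-strip recomputation of four boundary floor divisions by a remainder-propagation pass: the count of multiples of m in a block (x, x+base] is (x % m + base) // m, so B carries the running remainders of the strip boundary modulo n and n*n and takes one divmod per modulus per strip.
-- outside the precondition, e.g. on per_digit_counts(3, 2, 0): A returns [0.0, 0.0], B returns [0.0, -1.0]
import Mathlib
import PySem

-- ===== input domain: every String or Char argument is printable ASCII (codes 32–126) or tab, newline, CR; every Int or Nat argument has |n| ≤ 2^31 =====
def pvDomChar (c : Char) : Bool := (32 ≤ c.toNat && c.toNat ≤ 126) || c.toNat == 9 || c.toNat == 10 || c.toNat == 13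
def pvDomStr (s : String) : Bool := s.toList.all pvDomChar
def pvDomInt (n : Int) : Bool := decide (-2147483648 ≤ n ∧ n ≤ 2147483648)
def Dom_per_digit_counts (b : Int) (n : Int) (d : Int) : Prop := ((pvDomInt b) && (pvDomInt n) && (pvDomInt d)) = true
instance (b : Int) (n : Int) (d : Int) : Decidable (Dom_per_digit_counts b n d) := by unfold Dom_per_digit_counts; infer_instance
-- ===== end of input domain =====

-- B replaces A's per-strip boundary floor divisions by a single pass that propagates the strip
-- boundary's remainders modulo n and n*n, taking one divmod per modulus per strip (alternative decomposition).

-- ===== PORT A =====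
def per_digit_counts (b : Int) (n : Int) (d : Int) : List Int :=
  let n_sq := n * n
  let base := b ^ (d - 1).toNat
  (PySem.List.pyRange 1 b 1).foldl (fun counts k =>
    let lo := k * base
    let hi := (k + 1) * base - 1
    let c_n := PySem.Int.floordiv hi n - PySem.Int.floordiv (lo - 1) n
    let c_nsq := PySem.Int.floordiv hi n_sq - PySem.Int.floordiv (lo - 1) n_sq
    counts ++ [c_n - c_nsq]) []

-- ===== PORT B =====
def per_digit_counts_alt (b : Int) (n : Int) (d : Int) : List Int :=
  if b < 2 then []
  else
    let base := b ^ (d - 1).toNat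
    let m1 := n
    let m2 := n * n
    let r1 := PySem.Int.mod (base - 1) m1
    let r2 := PySem.Int.mod (base - 1) m2
    ((PySem.List.pyRange 1 b 1).foldl (fun (st : List Int × Int × Int) _ =>
      let q1 := PySem.Int.floordiv (st.2.1 + base) m1
      let r1' := PySem.Int.mod (st.2.1 + base) m1
      let q2 := PySem.Int.floordiv (st.2.2 + base) m2
      let r2' := PySem.Int.mod (st.2.2 + base) m2
      (st.1 ++ [q1 - q2], r1', r2')) ([], r1, r2)).1

-- ===== PRECONDITION & SPEC =====
-- Pre_ excludes exactly the inputs where Python A does not return a list of ints: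
-- n = 0 with b ≥ 2 (ZeroDivisionError), b = 0 with d < 1 (0**negative raises), and
-- b ≥ 2 with d < 1 (b**(d-1) is a float, so A returns floats, not ints).
def Pre_per_digit_counts (b : Int) (n : Int) (d : Int) : Prop :=
  (b ≤ 1 ∨ (1 ≤ d ∧ n ≠ 0)) ∧ (b = 0 → 1 ≤ d)
instance (b : Int) (n : Int) (d : Int) : Decidable (Pre_per_digit_counts b n d) := by unfold Pre_per_digit_counts; infer_instance

def pvWitness_per_digit_counts : Int × Int × Int := (10, 3, 2)

def Spec_per_digit_counts (b : Int) (n : Int) (d : Int) (out : List Int) : Prop := out = per_digit_counts_alt b n d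
instance (b : Int) (n : Int) (d : Int) (out : List Int) : Decidable (Spec_per_digit_counts b n d out) := by unfold Spec_per_digit_counts; infer_instance

-- ===== CLAIM (what is proved, stated in full; the proofs are below) =====
def Claim_equal_per_digit_counts : Prop := ∀ (b : Int) (n : Int) (d : Int), Dom_per_digit_counts b n d → Pre_per_digit_counts b n d → Spec_per_digit_counts b n d (per_digit_counts b n d)

-- ===== LEMMAS AND PROOFS =====

-- propagating a remainder through one block of length L: the quotient it yields
theorem fmod_add_fdiv_step (m x L : Int) (hm : m ≠ 0) :
    (x.fmod m + L).fdiv m = (x + L).fdiv m - x.fdiv m := by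
  have h : x.fmod m + L = (x + L) + (-(x.fdiv m)) * m := by
    have := Int.mul_fdiv_add_fmod x m
    linarith
  rw [h, Int.add_mul_fdiv_right _ _ hm]
  ring

-- and the remainder it leaves
theorem fmod_add_fmod_step (m x L : Int) :
    (x.fmod m + L).fmod m = (x + L).fmod m := by
  have h : x.fmod m + L = (x + L) + (-(x.fdiv m)) * m := by
    have := Int.mul_fdiv_add_fmod x m
    linarith
  rw [h, Int.add_mul_fmod_self_right]

-- per-strip count at boundary y (start of strip minus one)
def stripCount (m1 m2 base y : Int) : Int :=
  (PySem.Int.floordiv (y + base) m1 - PySem.Int.floordiv y m1)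
    - (PySem.Int.floordiv (y + base) m2 - PySem.Int.floordiv y m2)

-- invariant of B's fold: starting from the remainders of x, it appends the strip counts
-- at boundaries x, x+base, … and leaves the remainders of the final boundary
theorem alt_fold_invariant (m1 m2 base : Int) (hm1 : m1 ≠ 0) (hm2 : m2 ≠ 0) :
    ∀ (l : List Int) (cs : List Int) (x : Int),
      l.foldl (fun (st : List Int × Int × Int) _ =>
        let q1 := PySem.Int.floordiv (st.2.1 + base) m1
        let r1' := PySem.Int.mod (st.2.1 + base) m1
        let q2 := PySem.Int.floordiv (st.2.2 + base) m2
        let r2' := PySem.Int.mod (st.2.2 + base) m2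
        (st.1 ++ [q1 - q2], r1', r2')) (cs, PySem.Int.mod x m1, PySem.Int.mod x m2)
      = (cs ++ (List.range l.length).map (fun (i : Nat) => stripCount m1 m2 base (x + (i : Int) * base)),
         PySem.Int.mod (x + (l.length : Int) * base) m1, PySem.Int.mod (x + (l.length : Int) * base) m2) := by
  intro l
  induction l with
  | nil => intro cs x; simp
  | cons a t ih =>
    intro cs x
    simp only [List.foldl_cons]
    have e1 : PySem.Int.floordiv (PySem.Int.mod x m1 + base) m1
        = PySem.Int.floordiv (x + base) m1 - PySem.Int.floordiv x m1 :=
      fmod_add_fdiv_step m1 x base hm1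
    have e2 : PySem.Int.floordiv (PySem.Int.mod x m2 + base) m2
        = PySem.Int.floordiv (x + base) m2 - PySem.Int.floordiv x m2 :=
      fmod_add_fdiv_step m2 x base hm2
    have f1 : PySem.Int.mod (PySem.Int.mod x m1 + base) m1 = PySem.Int.mod (x + base) m1 :=
      fmod_add_fmod_step m1 x base
    have f2 : PySem.Int.mod (PySem.Int.mod x m2 + base) m2 = PySem.Int.mod (x + base) m2 :=
      fmod_add_fmod_step m2 x base
    simp only [e1, e2, f1, f2]
    have := ih (cs ++ [(PySem.Int.floordiv (x + base) m1 - PySem.Int.floordiv x m1)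
      - (PySem.Int.floordiv (x + base) m2 - PySem.Int.floordiv x m2)]) (x + base)
    rw [this]
    refine Prod.ext ?_ (Prod.ext ?_ ?_) <;> simp only
    · rw [List.append_assoc]
      congr 1
      rw [List.length_cons, List.range_succ_eq_map, List.map_cons, List.map_map,
        List.singleton_append]
      refine List.cons_eq_cons.mpr ⟨?_, ?_⟩
      · simp [stripCount]
      · apply List.map_congr_left
        intro i _
        simp only [Function.comp_apply]
        congr 1
        push_cast
        ring
    · congr 1; simp only [List.length_cons]; push_cast; ring
    · congr 1; simp only [List.length_cons]; push_cast; ring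

-- the main equality on the admitted inputs
theorem per_digit_counts_eq (b n d : Int) (hpre : Pre_per_digit_counts b n d) :
    per_digit_counts b n d = per_digit_counts_alt b n d := by
  unfold per_digit_counts per_digit_counts_alt
  by_cases hb : b < 2
  · have : PySem.List.pyRange 1 b 1 = [] := PySem.List.pyRange_one_eq_nil (by omega)
    simp [hb, this]
  · simp only [if_neg hb]
    have hn : n ≠ 0 := by
      rcases hpre with ⟨h1, _⟩
      rcases h1 with h | ⟨_, hn⟩
      · omega
      · exact hn
    have hn2 : n * n ≠ 0 := mul_ne_zero hn hn
    set base := b ^ (d - 1).toNat with hbase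
    rw [PySem.List.foldl_append_singleton_eq_map]
    rw [alt_fold_invariant n (n * n) base hn hn2 _ [] (base - 1)]
    simp only [List.nil_append]
    rw [PySem.List.pyRange_one 1 b, List.map_map]
    simp only [List.length_map, List.length_range]
    apply List.map_congr_left
    intro i _
    simp only [Function.comp_apply, stripCount]
    have h1 : base - 1 + (i : Int) * base = (1 + (i : Int)) * base - 1 := by ring
    have h2 : base - 1 + (i : Int) * base + base = (1 + (i : Int) + 1) * base - 1 := by ring
    rw [h2, h1]

-- ===== VERDICT (by name: the statement is the Claim_ definition above) =====
theorem per_digit_counts_spec : Claim_equal_per_digit_counts := by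
  intro b n d _ hpre
  unfold Spec_per_digit_counts
  exact per_digit_counts_eq b n d hpre
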